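-- pv_equiv track=rewrite | github.com/letatanu/AI_MineSweeper | Agent.py | getBorderCells
-- ===== SOURCE A (Python) =====
-- def getBorderCells(grid):
--     result = []
--     maxI = len(grid)
--     maxJ = len(grid[0])
--     for i, row in enumerate(grid):
--         for j, cell in enumerate(row):
--             if 0 <= i - 1:
--                 if grid[i - 1][j] == 'E':
--                     result.append([i,j])
--                     continue
--                 if 0 <= j - 1:
--                     if grid[i - 1][j - 1] == 'E':
--                         result.append([i,j])
--                         continue
--                 if maxJ > j + 1:
--                     if grid[i - 1][j + 1] == 'E':
--                         result.append([i,j])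
--                         continue
--             if 0 <= j - 1:
--                 if grid[i][j - 1] == 'E':
--                     result.append([i,j])
--                     continue
--             if maxJ > j + 1:
--                 if grid[i][j + 1] == 'E':
--                     result.append([i,j])
--                     continue
--             if maxI > i + 1:
--                 if grid[i + 1][j] == 'E':
--                     result.append([i,j])
--                     continue
--                 if 0 <= j - 1:
--                     if grid[i + 1][j - 1] == 'E':
--                         result.append([i,j])
--                         continue
--                 if maxJ > j + 1:
--                     if grid[i + 1][j + 1] == 'E':
--                         result.append([i,j])
--                         continue
--     return result
-- ===== SOURCE B (Python) =====
-- def getBorderCells(grid):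
--     maxI = len(grid)
--     maxJ = len(grid[0])
--     border = set()
--     for a, row in enumerate(grid):
--         for b, cell in enumerate(row):
--             if cell == 'E':
--                 for dx, dy in ((-1, -1), (-1, 0), (-1, 1), (0, -1), (0, 1), (1, -1), (1, 0), (1, 1)):
--                     x, y = a + dx, b + dy
--                     if 0 <= x < maxI and 0 <= y < maxJ:
--                         border.add((x, y))
--     return [[i, j] for i, row in enumerate(grid) for j, _ in enumerate(row) if (i, j) in border]
-- ===== Notes on version B (the rewrite author's own statement) =====
-- stated objective: alternative
-- what changed: Instead of A's per-cell scan of up to 8 guarded neighbor reads, B scans once for 'E' cells, marks all in-bounds neighbors of each into a set of border coordinates, then emits [i,j] in row-major order for cells found in the set.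
-- outside the precondition, e.g. on getBorderCells([['E', 'E'], ['E']]): A returns [[0, 0], [0, 1], [1, 0]], B returns [[0, 0], [0, 1], [1, 0]]
import Mathlib
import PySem

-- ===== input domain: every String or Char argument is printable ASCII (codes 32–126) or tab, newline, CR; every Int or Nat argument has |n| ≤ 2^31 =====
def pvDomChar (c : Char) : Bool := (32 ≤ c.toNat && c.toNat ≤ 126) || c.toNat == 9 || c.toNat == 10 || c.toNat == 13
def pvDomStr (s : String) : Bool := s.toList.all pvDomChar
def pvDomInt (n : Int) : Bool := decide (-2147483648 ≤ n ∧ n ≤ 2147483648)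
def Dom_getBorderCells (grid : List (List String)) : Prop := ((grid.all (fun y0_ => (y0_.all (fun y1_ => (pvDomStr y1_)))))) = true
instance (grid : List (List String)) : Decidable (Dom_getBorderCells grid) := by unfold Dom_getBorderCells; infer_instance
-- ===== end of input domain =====

-- B replaces A's per-cell cascade of 8 guarded neighbor reads by one scan that collects into a set
-- the in-bounds neighbors of every 'E' cell, then emits matching cells in row-major order (alternative decomposition, same cost).

-- ===== PORT A =====
-- grid[i][j] read under A's bound guards (total form; used only at in-range nonnegative indices under Pre_)
def pvCell (grid : List (List String)) (i j : Int) : String :=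
  PySem.List.pyGetD (PySem.List.pyGetD grid i []) j ""

-- the body of A's inner loop: the cascade of guarded checks with 'continue' (append iff some guarded check fires, in A's order)
def pvFlag (grid : List (List String)) (maxI maxJ : Int) (i j : Int) : Bool :=
  (decide (0 ≤ i - 1) &&
    ((pvCell grid (i - 1) j == "E")
      || (decide (0 ≤ j - 1) && (pvCell grid (i - 1) (j - 1) == "E"))
      || (decide (maxJ > j + 1) && (pvCell grid (i - 1) (j + 1) == "E"))))
  || (decide (0 ≤ j - 1) && (pvCell grid i (j - 1) == "E"))
  || (decide (maxJ > j + 1) && (pvCell grid i (j + 1) == "E"))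
  || (decide (maxI > i + 1) &&
    ((pvCell grid (i + 1) j == "E")
      || (decide (0 ≤ j - 1) && (pvCell grid (i + 1) (j - 1) == "E"))
      || (decide (maxJ > j + 1) && (pvCell grid (i + 1) (j + 1) == "E"))))

def getBorderCells (grid : List (List String)) : List (List Int) :=
  let maxI : Int := grid.length
  let maxJ : Int := (grid.headD []).length   -- grid[0]; Python raises on [] (excluded by Pre_)
  (PySem.List.enumerate grid).foldl (fun res p =>
    (PySem.List.enumerate p.2).foldl (fun res q =>
      if pvFlag grid maxI maxJ p.1 q.1 then res ++ [[p.1, q.1]] else res) res) []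

-- ===== PORT B =====
def pvOffsets : List (Int × Int) :=
  [(-1, -1), (-1, 0), (-1, 1), (0, -1), (0, 1), (1, -1), (1, 0), (1, 1)]

def getBorderCells_alt (grid : List (List String)) : List (List Int) :=
  let maxI : Int := grid.length
  let maxJ : Int := (grid.headD []).length   -- grid[0]; Python raises on [] (excluded by Pre_)
  let border : PySem.Set (Int × Int) :=
    (PySem.List.enumerate grid).foldl (fun s p =>
      (PySem.List.enumerate p.2).foldl (fun s q =>
        if q.2 == "E" then
          pvOffsets.foldl (fun s d =>
            if decide (0 ≤ p.1 + d.1) && decide (p.1 + d.1 < maxI)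
                && decide (0 ≤ q.1 + d.2) && decide (q.1 + d.2 < maxJ)
            then PySem.Set.add s (p.1 + d.1, q.1 + d.2) else s) s
        else s) s) PySem.Set.empty
  (PySem.List.enumerate grid).foldl (fun res p =>
    (PySem.List.enumerate p.2).foldl (fun res q =>
      if PySem.Set.contains border (p.1, q.1) then res ++ [[p.1, q.1]] else res) res) []

-- ===== PRECONDITION & SPEC =====
-- Pre_ requires a nonempty rectangular grid: A raises IndexError on the empty grid (grid[0]) and on most
-- jagged grids (neighbor reads past a short row); on the remaining jagged grids A's value is an accident
-- of its uniform maxJ bound, so jagged grids are excluded as a whole.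
def Pre_getBorderCells (grid : List (List String)) : Prop :=
  grid ≠ [] ∧ ∀ row ∈ grid, row.length = (grid.headD []).length
instance (grid : List (List String)) : Decidable (Pre_getBorderCells grid) := by
  unfold Pre_getBorderCells; infer_instance

def pvWitness_getBorderCells : List (List String) := [["E", "x"], ["x", "x"]]

def Spec_getBorderCells (grid : List (List String)) (out : List (List Int)) : Prop := out = getBorderCells_alt grid
instance (grid : List (List String)) (out : List (List Int)) : Decidable (Spec_getBorderCells grid out) := by unfold Spec_getBorderCells; infer_instance

-- ===== CLAIM (what is proved, stated in full; the proofs are below) =====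
def Claim_equal_getBorderCells : Prop := ∀ (grid : List (List String)), Dom_getBorderCells grid → Pre_getBorderCells grid → Spec_getBorderCells grid (getBorderCells grid)

-- ===== LEMMAS AND PROOFS =====

-- membership in a fold over sets whose step adds exactly the elements satisfying P
theorem pv_mem_foldl {ι α : Type} [BEq α] (h : PySem.Set α → ι → PySem.Set α) (P : α → ι → Prop)
    (H : ∀ s x u, u ∈ h s x ↔ u ∈ s ∨ P u x) (xs : List ι) (s : PySem.Set α) (u : α) :
    u ∈ xs.foldl h s ↔ u ∈ s ∨ ∃ x ∈ xs, P u x := by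
  induction xs generalizing s with
  | nil => simp
  | cons x xs ih =>
    rw [List.foldl_cons, ih, H]
    constructor
    · rintro ((h1 | h2) | ⟨y, hy, hP⟩)
      · exact Or.inl h1
      · exact Or.inr ⟨x, List.mem_cons_self, h2⟩
      · exact Or.inr ⟨y, List.mem_cons_of_mem _ hy, hP⟩
    · rintro (h1 | ⟨y, hy, hP⟩)
      · exact Or.inl (Or.inl h1)
      · rcases List.mem_cons.mp hy with rfl | hy
        · exact Or.inl (Or.inr hP)
        · exact Or.inr ⟨y, hy, hP⟩

-- the condition characterized by A's cascade: some in-bounds 8-neighbor of (i, j) holds 'E'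
def pvNearE (grid : List (List String)) (maxI maxJ i j : Int) : Prop :=
  ∃ d ∈ pvOffsets, 0 ≤ i + d.1 ∧ i + d.1 < maxI ∧ 0 ≤ j + d.2 ∧ j + d.2 < maxJ ∧
    pvCell grid (i + d.1) (j + d.2) = "E"

theorem pvFlag_iff (grid : List (List String)) (maxI maxJ i j : Int)
    (hi0 : 0 ≤ i) (hi1 : i < maxI) (hj0 : 0 ≤ j) (hj1 : j < maxJ) :
    pvFlag grid maxI maxJ i j = true ↔ pvNearE grid maxI maxJ i j := by
  unfold pvFlag pvNearE
  simp only [Bool.or_eq_true, Bool.and_eq_true, decide_eq_true_iff, beq_iff_eq,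
    pvOffsets, List.mem_cons, List.not_mem_nil, or_false, exists_eq_or_imp, exists_eq_left,
    sub_eq_add_neg, add_zero, gt_iff_lt]
  have ha1 : i + -1 < maxI := by omega
  have ha2 : 0 ≤ i + 1 := by omega
  have ha3 : j + -1 < maxJ := by omega
  have ha4 : 0 ≤ j + 1 := by omega
  constructor
  · rintro (((⟨hg, ((hE | ⟨hg2, hE⟩) | ⟨hg2, hE⟩)⟩ | ⟨hg, hE⟩) | ⟨hg, hE⟩) |
      ⟨hg, ((hE | ⟨hg2, hE⟩) | ⟨hg2, hE⟩)⟩)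
    · exact Or.inr (Or.inl ⟨hg, ha1, hj0, hj1, hE⟩)
    · exact Or.inl ⟨hg, ha1, hg2, ha3, hE⟩
    · exact Or.inr (Or.inr (Or.inl ⟨hg, ha1, ha4, hg2, hE⟩))
    · exact Or.inr (Or.inr (Or.inr (Or.inl ⟨hi0, hi1, hg, ha3, hE⟩)))
    · exact Or.inr (Or.inr (Or.inr (Or.inr (Or.inl ⟨hi0, hi1, ha4, hg, hE⟩))))
    · exact Or.inr (Or.inr (Or.inr (Or.inr (Or.inr (Or.inr (Or.inl ⟨ha2, hg, hj0, hj1, hE⟩))))))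
    · exact Or.inr (Or.inr (Or.inr (Or.inr (Or.inr (Or.inl ⟨ha2, hg, hg2, ha3, hE⟩)))))
    · exact Or.inr (Or.inr (Or.inr (Or.inr (Or.inr (Or.inr (Or.inr ⟨ha2, hg, ha4, hg2, hE⟩))))))
  · rintro (⟨b1, b2, b3, b4, hE⟩ | ⟨b1, b2, b3, b4, hE⟩ | ⟨b1, b2, b3, b4, hE⟩ |
      ⟨b1, b2, b3, b4, hE⟩ | ⟨b1, b2, b3, b4, hE⟩ | ⟨b1, b2, b3, b4, hE⟩ |
      ⟨b1, b2, b3, b4, hE⟩ | ⟨b1, b2, b3, b4, hE⟩)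
    · exact Or.inl (Or.inl (Or.inl ⟨b1, Or.inl (Or.inr ⟨b3, hE⟩)⟩))
    · exact Or.inl (Or.inl (Or.inl ⟨b1, Or.inl (Or.inl hE)⟩))
    · exact Or.inl (Or.inl (Or.inl ⟨b1, Or.inr ⟨b4, hE⟩⟩))
    · exact Or.inl (Or.inl (Or.inr ⟨b3, hE⟩))
    · exact Or.inl (Or.inr ⟨b4, hE⟩)
    · exact Or.inr ⟨b2, Or.inl (Or.inr ⟨b3, hE⟩)⟩
    · exact Or.inr ⟨b2, Or.inl (Or.inl hE)⟩
    · exact Or.inr ⟨b2, Or.inr ⟨b4, hE⟩⟩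

theorem pvCell_eq (grid : List (List String)) (a b : Nat) (ha : a < grid.length)
    (hb : b < (grid[a]).length) : pvCell grid (a : Int) (b : Int) = grid[a][b] := by
  unfold pvCell
  rw [PySem.List.pyGetD_natCast grid a [], List.getD_eq_getElem _ _ ha,
    PySem.List.pyGetD_natCast, List.getD_eq_getElem _ _ hb]

-- characterization of membership in B's border set
theorem pv_mem_border (grid : List (List String)) (maxI maxJ : Int) (u : Int × Int) :
    u ∈ (PySem.List.enumerate grid).foldl (fun s p =>
      (PySem.List.enumerate p.2).foldl (fun s q =>
        if q.2 == "E" then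
          pvOffsets.foldl (fun s d =>
            if decide (0 ≤ p.1 + d.1) && decide (p.1 + d.1 < maxI)
                && decide (0 ≤ q.1 + d.2) && decide (q.1 + d.2 < maxJ)
            then PySem.Set.add s (p.1 + d.1, q.1 + d.2) else s) s
        else s) s) (PySem.Set.empty : PySem.Set (Int × Int)) ↔
    ∃ p ∈ PySem.List.enumerate grid, ∃ q ∈ PySem.List.enumerate p.2, q.2 = "E" ∧
      ∃ d ∈ pvOffsets, 0 ≤ p.1 + d.1 ∧ p.1 + d.1 < maxI ∧ 0 ≤ q.1 + d.2 ∧ q.1 + d.2 < maxJ ∧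
        u = (p.1 + d.1, q.1 + d.2) := by
  rw [pv_mem_foldl _
    (fun u p => ∃ q ∈ PySem.List.enumerate p.2, q.2 = "E" ∧
      ∃ d ∈ pvOffsets, 0 ≤ p.1 + d.1 ∧ p.1 + d.1 < maxI ∧ 0 ≤ q.1 + d.2 ∧ q.1 + d.2 < maxJ ∧
        u = (p.1 + d.1, q.1 + d.2))]
  · simp [PySem.Set.empty]
  · intro s p u
    rw [pv_mem_foldl _
      (fun u q => q.2 = "E" ∧
        ∃ d ∈ pvOffsets, 0 ≤ p.1 + d.1 ∧ p.1 + d.1 < maxI ∧ 0 ≤ q.1 + d.2 ∧ q.1 + d.2 < maxJ ∧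
          u = (p.1 + d.1, q.1 + d.2))]
    intro s q u
    by_cases hq : q.2 = "E"
    · simp only [hq, beq_self_eq_true, if_true]
      rw [pv_mem_foldl _
        (fun u d => 0 ≤ p.1 + d.1 ∧ p.1 + d.1 < maxI ∧ 0 ≤ q.1 + d.2 ∧ q.1 + d.2 < maxJ ∧
          u = (p.1 + d.1, q.1 + d.2))]
      · simp
      · intro s d u
        split_ifs with hg
        · simp only [Bool.and_eq_true, decide_eq_true_iff] at hg
          rw [PySem.Set.mem_add]
          constructor
          · rintro (h | rfl)
            · exact Or.inl h
            · exact Or.inr ⟨hg.1.1.1, hg.1.1.2, hg.1.2, hg.2, rfl⟩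
          · rintro (h | ⟨_, _, _, _, rfl⟩)
            · exact Or.inl h
            · exact Or.inr rfl
        · simp only [Bool.and_eq_true, decide_eq_true_iff] at hg
          constructor
          · exact Or.inl
          · rintro (h | ⟨h1, h2, h3, h4, rfl⟩)
            · exact h
            · exact absurd ⟨⟨⟨h1, h2⟩, h3⟩, h4⟩ hg
    · simp [hq]

-- the two emission conditions agree on every actual cell of a rectangular grid
theorem pv_cond_eq (grid : List (List String))
    (hrect : ∀ row ∈ grid, row.length = (grid.headD []).length)
    (i j : Nat) (hi : i < grid.length) (hj : j < (grid[i]).length) :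
    pvFlag grid grid.length (grid.headD []).length (i : Int) (j : Int) =
    PySem.Set.contains ((PySem.List.enumerate grid).foldl (fun s p =>
      (PySem.List.enumerate p.2).foldl (fun s q =>
        if q.2 == "E" then
          pvOffsets.foldl (fun s d =>
            if decide (0 ≤ p.1 + d.1) && decide (p.1 + d.1 < (grid.length : Int))
                && decide (0 ≤ q.1 + d.2) && decide (q.1 + d.2 < ((grid.headD []).length : Int))
            then PySem.Set.add s (p.1 + d.1, q.1 + d.2) else s) s
        else s) s) (PySem.Set.empty : PySem.Set (Int × Int))) ((i : Int), (j : Int)) := by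
  have hjw : j < (grid.headD []).length := by
    rw [← hrect grid[i] (List.getElem_mem hi)]; exact hj
  rw [Bool.eq_iff_iff]
  simp only [PySem.Set.contains]
  rw [List.contains_iff_mem, pv_mem_border,
    pvFlag_iff grid _ _ _ _ (by positivity) (by exact_mod_cast hi) (by positivity)
      (by exact_mod_cast hjw)]
  unfold pvNearE
  constructor
  · rintro ⟨d, hd, b1, b2, b3, b4, hE⟩
    -- the E cell sits at (i + d.1, j + d.2); present it as an enumerated cell, negate the offset
    have hea : ((((i : Int) + d.1).toNat : Int)) = (i : Int) + d.1 := Int.toNat_of_nonneg b1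
    have heb : ((((j : Int) + d.2).toNat : Int)) = (j : Int) + d.2 := Int.toNat_of_nonneg b3
    have ha : ((i : Int) + d.1).toNat < grid.length := by omega
    have hbw : ((j : Int) + d.2).toNat < (grid[((i : Int) + d.1).toNat]).length := by
      rw [hrect _ (List.getElem_mem ha)]; omega
    refine ⟨((((i : Int) + d.1).toNat : Int), grid[((i : Int) + d.1).toNat]), ?_,
      ((((j : Int) + d.2).toNat : Int), grid[((i : Int) + d.1).toNat][((j : Int) + d.2).toNat]),
      ?_, ?_, (-d.1, -d.2), ?_, ?_, ?_, ?_, ?_, ?_⟩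
    · rw [PySem.List.mem_enumerate_iff]; exact ⟨_, ha, by simp⟩
    · rw [PySem.List.mem_enumerate_iff]; exact ⟨_, hbw, by simp⟩
    · show grid[((i : Int) + d.1).toNat][((j : Int) + d.2).toNat] = "E"
      rw [← pvCell_eq grid _ _ ha hbw, hea, heb]; exact hE
    · simp only [pvOffsets, List.mem_cons, List.not_mem_nil, or_false] at hd ⊢
      rcases hd with rfl | rfl | rfl | rfl | rfl | rfl | rfl | rfl <;> simp
    · show (0 : Int) ≤ _ + -d.1; omega
    · show (_ : Int) + -d.1 < (grid.length : Int); omega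
    · show (0 : Int) ≤ _ + -d.2; omega
    · show (_ : Int) + -d.2 < ((grid.headD []).length : Int); omega
    · show ((i : Int), (j : Int)) = (_ + -d.1, _ + -d.2)
      simp only [Prod.mk.injEq]; exact ⟨by omega, by omega⟩
  · rintro ⟨p, hp, q, hq, hE, d, hd, b1, b2, b3, b4, huv⟩
    rw [PySem.List.mem_enumerate_iff] at hp
    obtain ⟨a, ha, rfl⟩ := hp
    rw [PySem.List.mem_enumerate_iff] at hq
    obtain ⟨b, hb, rfl⟩ := hq
    simp only [zero_add, Prod.mk.injEq] at hE b1 b2 b3 b4 huv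
    obtain ⟨hiv, hjv⟩ := huv
    have hbw : b < (grid.headD []).length := by
      rw [← hrect grid[a] (List.getElem_mem ha)]; exact hb
    refine ⟨(-d.1, -d.2), ?_, ?_, ?_, ?_, ?_, ?_⟩
    · simp only [pvOffsets, List.mem_cons, List.not_mem_nil, or_false] at hd ⊢
      rcases hd with rfl | rfl | rfl | rfl | rfl | rfl | rfl | rfl <;> simp
    · show (0 : Int) ≤ (i : Int) + -d.1; omega
    · show ((i : Int) + -d.1) < (grid.length : Int); omega
    · show (0 : Int) ≤ (j : Int) + -d.2; omega
    · show ((j : Int) + -d.2) < ((grid.headD []).length : Int); omega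
    · have e1 : (i : Int) + -d.1 = ((a : Nat) : Int) := by omega
      have e2 : (j : Int) + -d.2 = ((b : Nat) : Int) := by omega
      show pvCell grid ((i : Int) + -d.1) ((j : Int) + -d.2) = "E"
      rw [e1, e2, pvCell_eq grid a b ha hb]; exact hE

-- ===== VERDICT (by name: the statement is the Claim_ definition above) =====
theorem getBorderCells_spec : Claim_equal_getBorderCells := by
  intro grid _ hpre
  unfold Spec_getBorderCells getBorderCells getBorderCells_alt
  apply PySem.List.foldl_congr_mem
  intro acc p hp
  rw [PySem.List.mem_enumerate_iff] at hp
  obtain ⟨a, ha, rfl⟩ := hp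
  apply PySem.List.foldl_congr_mem
  intro acc2 q hq
  rw [PySem.List.mem_enumerate_iff] at hq
  obtain ⟨b, hb, rfl⟩ := hq
  simp only [zero_add] at hb ⊢
  rw [pv_cond_eq grid hpre.2 a b ha hb]
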